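-- pv_equiv track=rewrite | github.com/prussiadev/The-Price-For-Peace | python_scripts/block_comment.py | comment_set_technology_blocks
-- ===== SOURCE A (Python) =====
-- def comment_set_technology_blocks(text):
--     lines = text.splitlines()
--     out = []
--
--     in_block = False
--     brace_depth = 0
--
--     for line in lines:
--         stripped = line.strip()
--
--         # Detect block start
--         if not in_block and stripped.startswith("add_dynamic_modifier") and "{" in stripped:
--             in_block = True
--             brace_depth = stripped.count("{") - stripped.count("}")
--             out.append("# " + line)
--             continue
--
--         if in_block:
--             brace_depth += stripped.count("{")
--             brace_depth -= stripped.count("}")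
--
--             out.append("# " + line)
--
--             if brace_depth <= 0:
--                 in_block = False
--
--             continue
--
--         out.append(line)
--
--     return "\n".join(out)
-- ===== SOURCE B (Python) =====
-- def comment_set_technology_blocks(text):
--     lines = text.splitlines()
--     n = len(lines)
--     # staged pass 1: per-line features (no string work after this point)
--     stripped = [l.strip() for l in lines]
--     starts = [s.startswith("add_dynamic_modifier") and "{" in s for s in stripped]
--     deltas = [s.count("{") - s.count("}") for s in stripped]
--     # staged pass 2: mark the commented ranges in a boolean mask
--     mask = [False] * n
--     i = 0
--     while i < n:
--         if starts[i]:
--             mask[i] = True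
--             acc = deltas[i]
--             j = i + 1
--             while j < n:
--                 mask[j] = True
--                 acc += deltas[j]
--                 j += 1
--                 if acc <= 0:
--                     break
--             i = j
--         else:
--             i += 1
--     # staged pass 3: render
--     return "\n".join("# " + l if m else l for l, m in zip(lines, mask))
-- ===== Notes on version B (the rewrite author's own statement) =====
-- stated objective: alternative
-- what changed: B replaces A's single interleaved pass that mutates in_block/brace_depth flags while appending transformed strings by three staged passes over different data: first extract per-line numeric/boolean features (start flag, brace delta), then mark commented ranges in a boolean mask using only those features, then render every line once from the mask with a zip.
import Mathlib
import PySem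

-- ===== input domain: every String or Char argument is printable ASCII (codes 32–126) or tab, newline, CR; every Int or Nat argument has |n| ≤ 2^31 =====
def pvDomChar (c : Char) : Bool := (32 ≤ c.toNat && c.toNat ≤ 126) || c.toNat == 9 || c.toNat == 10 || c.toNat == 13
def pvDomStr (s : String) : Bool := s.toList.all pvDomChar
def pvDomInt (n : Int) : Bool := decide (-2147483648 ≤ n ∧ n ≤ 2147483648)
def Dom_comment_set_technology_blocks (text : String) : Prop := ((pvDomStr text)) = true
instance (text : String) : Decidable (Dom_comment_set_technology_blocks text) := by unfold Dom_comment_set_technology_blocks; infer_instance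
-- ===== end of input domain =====

-- B replaces A's interleaved flag/depth state machine by three staged passes
-- (per-line features, a boolean mask of commented ranges, a zip render); same cost.

-- ===== PORT A =====
-- the test 'stripped.startswith(...) and "{" in stripped' and the brace delta of a line
def pvIsStart (l : String) : Bool :=
  PySem.Str.startswith (PySem.Str.strip l) "add_dynamic_modifier" && PySem.Str.isIn "{" (PySem.Str.strip l)

def pvDelta (l : String) : Int :=
  (PySem.Str.count (PySem.Str.strip l) "{" : Int) - (PySem.Str.count (PySem.Str.strip l) "}" : Int)

-- one iteration of A's for-loop: state = (in_block, brace_depth, out)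
def pvAStep (st : Bool × Int × List String) (line : String) : Bool × Int × List String :=
  if !st.1 && pvIsStart line then
    (true, pvDelta line, st.2.2 ++ ["# " ++ line])
  else if st.1 then
    let d := st.2.1 + pvDelta line
    (if d ≤ 0 then false else true, d, st.2.2 ++ ["# " ++ line])
  else
    (st.1, st.2.1, st.2.2 ++ [line])

def comment_set_technology_blocks (text : String) : String :=
  PySem.Str.join "\n" ((PySem.Str.splitlines text).foldl pvAStep (false, 0, [])).2.2

-- ===== PORT B =====
-- B's inner index loop: consume feature records, marking True, until the depth closes;
-- returns (mask bits for the consumed records, remaining records)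
def pvConsume (acc : Int) : List (Bool × Int) → List Bool × List (Bool × Int)
  | [] => ([], [])
  | r :: rs =>
    let a := acc + r.2
    if a ≤ 0 then ([true], rs)
    else
      let p := pvConsume a rs
      (true :: p.1, p.2)

theorem pvConsume_rest_le (acc : Int) (rs : List (Bool × Int)) :
    (pvConsume acc rs).2.length ≤ rs.length := by
  induction rs generalizing acc with
  | nil => simp [pvConsume]
  | cons r rs ih =>
    simp only [pvConsume]
    split
    · simp
    · exact le_trans (ih _) (Nat.le_succ _)

-- B's outer index loop over the feature arrays, producing the boolean mask
def pvMask : List (Bool × Int) → List Bool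
  | [] => []
  | r :: rs =>
    if r.1 then
      let c := pvConsume r.2 rs
      true :: (c.1 ++ pvMask c.2)
    else
      false :: pvMask rs
  termination_by rs => rs.length
  decreasing_by
  · exact Nat.lt_succ_of_le (pvConsume_rest_le _ _)
  · simp

def comment_set_technology_blocks_alt (text : String) : String :=
  let lines := PySem.Str.splitlines text
  let stripped := lines.map PySem.Str.strip
  let starts := stripped.map (fun s => PySem.Str.startswith s "add_dynamic_modifier" && PySem.Str.isIn "{" s)
  let deltas := stripped.map (fun s => ((PySem.Str.count s "{" : Int) - (PySem.Str.count s "}" : Int)))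
  let mask := pvMask (starts.zip deltas)
  PySem.Str.join "\n" ((lines.zip mask).map (fun p => if p.2 then "# " ++ p.1 else p.1))

-- ===== PRECONDITION & SPEC =====
def Spec_comment_set_technology_blocks (text : String) (out : String) : Prop := out = comment_set_technology_blocks_alt text
instance (text : String) (out : String) : Decidable (Spec_comment_set_technology_blocks text out) := by unfold Spec_comment_set_technology_blocks; infer_instance

-- ===== CLAIM (what is proved, stated in full; the proofs are below) =====
def Claim_equal_comment_set_technology_blocks : Prop := ∀ (text : String), Dom_comment_set_technology_blocks text → Spec_comment_set_technology_blocks text (comment_set_technology_blocks text)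

-- ===== LEMMAS AND PROOFS =====

-- proof-only middle form: commented-lines view of B's block consumption and scan
def pvBBlock (depth : Int) : List String → List String × List String
  | [] => ([], [])
  | l :: ls =>
    let d := depth + pvDelta l
    if d ≤ 0 then (["# " ++ l], ls)
    else
      let r := pvBBlock d ls
      (("# " ++ l) :: r.1, r.2)

theorem pvBBlock_rest_le (depth : Int) (ls : List String) :
    (pvBBlock depth ls).2.length ≤ ls.length := by
  induction ls generalizing depth with
  | nil => simp [pvBBlock]
  | cons l ls ih =>
    simp only [pvBBlock]
    split
    · simp
    · exact le_trans (ih _) (Nat.le_succ _)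

def pvBMain : List String → List String
  | [] => []
  | l :: ls =>
    if pvIsStart l then
      let r := pvBBlock (pvDelta l) ls
      ("# " ++ l) :: (r.1 ++ pvBMain r.2)
    else
      l :: pvBMain ls
  termination_by ls => ls.length
  decreasing_by
  · exact Nat.lt_succ_of_le (pvBBlock_rest_le _ _)
  · simp

-- the per-line feature record
def pvKey (l : String) : Bool × Int := (pvIsStart l, pvDelta l)

def pvRender (p : String × Bool) : String := if p.2 then "# " ++ p.1 else p.1

-- zip of two maps over the same list is a map of the pair
theorem pvZipMap {α β γ : Type} (f : α → β) (g : α → γ) (ls : List α) :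
    (ls.map f).zip (ls.map g) = ls.map (fun a => (f a, g a)) := by
  induction ls with
  | nil => rfl
  | cons a ls ih => simp [ih]

-- pvConsume on the feature records leaves exactly the records of pvBBlock's rest
theorem pvConsume_rest (ls : List String) (d : Int) :
    (pvConsume d (ls.map pvKey)).2 = (pvBBlock d ls).2.map pvKey := by
  induction ls generalizing d with
  | nil => simp [pvConsume, pvBBlock]
  | cons l ls ih =>
    simp only [List.map_cons, pvConsume, pvBBlock, pvKey]
    split
    · rfl
    · exact ih _

-- rendering the consumed mask prefix equals pvBBlock's commented lines
theorem pvConsume_render (ls : List String) (d : Int) (m' : List Bool) :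
    ((ls.zip ((pvConsume d (ls.map pvKey)).1 ++ m')).map pvRender) =
      (pvBBlock d ls).1 ++ ((pvBBlock d ls).2.zip m').map pvRender := by
  induction ls generalizing d m' with
  | nil => simp [pvConsume, pvBBlock]
  | cons l ls ih =>
    simp only [List.map_cons, pvConsume, pvBBlock, pvKey]
    by_cases hd : d + pvDelta l ≤ 0
    · simp [hd, pvRender]
    · simp only [hd, if_false]
      simp [pvRender, ih (d + pvDelta l) m']

-- rendering the whole mask equals pvBMain
theorem pvMask_render (ls : List String) :
    (ls.zip (pvMask (ls.map pvKey))).map pvRender = pvBMain ls := by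
  induction ls using pvBMain.induct with
  | case1 => simp [pvBMain, pvMask]
  | case2 l ls h r ih =>
    rw [pvBMain]
    simp only [List.map_cons, pvMask, pvKey, h, if_true]
    simp only [List.zip_cons_cons, List.map_cons, pvRender, if_true]
    rw [pvConsume_render, pvConsume_rest, ih]
  | case3 l ls h ih =>
    rw [pvBMain]
    simp only [List.map_cons, pvMask, pvKey, h, Bool.false_eq_true, if_false]
    simp only [List.zip_cons_cons, List.map_cons, pvRender, Bool.false_eq_true, if_false]
    rw [ih]

-- when not in a block, A's fold output does not depend on the stored depth
theorem pvA_depth_indep (ls : List String) (d d' : Int) (out : List String) :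
    (ls.foldl pvAStep (false, d, out)).2.2 = (ls.foldl pvAStep (false, d', out)).2.2 := by
  induction ls generalizing d d' out with
  | nil => rfl
  | cons l ls ih =>
    simp only [List.foldl_cons, pvAStep, Bool.not_false, Bool.true_and]
    split
    · rfl
    · exact ih _ _ _

-- A's in-block phase equals the block-consume view
theorem pvA_block (ls : List String) (d : Int) (out : List String) :
    (ls.foldl pvAStep (true, d, out)).2.2 =
      ((pvBBlock d ls).2.foldl pvAStep (false, 0, out ++ (pvBBlock d ls).1)).2.2 := by
  induction ls generalizing d out with
  | nil => simp [pvBBlock]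
  | cons l ls ih =>
    simp only [List.foldl_cons, pvAStep, pvBBlock, Bool.not_true, Bool.false_and,
      Bool.false_eq_true, if_false, if_true]
    by_cases hd : d + pvDelta l ≤ 0
    · rw [if_pos hd, if_pos hd]
      exact pvA_depth_indep ls _ 0 (out ++ ["# " ++ l])
    · rw [if_neg hd, if_neg hd]
      simpa [List.append_assoc] using ih (d + pvDelta l) (out ++ ["# " ++ l])

-- A's fold from the idle state equals pvBMain
theorem pvA_main (ls : List String) (out : List String) :
    (ls.foldl pvAStep (false, 0, out)).2.2 = out ++ pvBMain ls := by
  induction ls using pvBMain.induct generalizing out with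
  | case1 => simp [pvBMain]
  | case2 l ls h r ih =>
    rw [pvBMain]
    simp only [List.foldl_cons, pvAStep, Bool.not_false, Bool.true_and, h, if_true]
    rw [pvA_block, ih]
    show out ++ ["# " ++ l] ++ (pvBBlock (pvDelta l) ls).1 ++ pvBMain (pvBBlock (pvDelta l) ls).2 = _
    simp [List.append_assoc]
  | case3 l ls h ih =>
    rw [pvBMain]
    simp only [List.foldl_cons, pvAStep, Bool.not_false, Bool.true_and, h,
      Bool.false_eq_true, if_false]
    rw [ih]
    simp

-- ===== VERDICT (by name: the statement is the Claim_ definition above) =====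
theorem comment_set_technology_blocks_spec : Claim_equal_comment_set_technology_blocks := by
  intro text _
  unfold Spec_comment_set_technology_blocks comment_set_technology_blocks comment_set_technology_blocks_alt
  rw [pvA_main]
  simp only [List.map_map, pvZipMap, Function.comp_def]
  have hkey : (fun a : String =>
      (PySem.Str.startswith (PySem.Str.strip a) "add_dynamic_modifier" && PySem.Str.isIn "{" (PySem.Str.strip a),
        ((PySem.Str.count (PySem.Str.strip a) "{" : Int) - (PySem.Str.count (PySem.Str.strip a) "}" : Int)))) = pvKey := by
    funext a
    simp [pvKey, pvIsStart, pvDelta]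
  rw [hkey, show (fun (p : String × Bool) => if p.2 then "# " ++ p.1 else p.1) = pvRender from rfl,
    pvMask_render]
  simp
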